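-- pv_equiv track=rewrite | github.com/S8-StudyGroup/Navigate-Basic-Algorithms | NBA_jinseong/2022_10/week_4th/68645.py | solution
-- ===== SOURCE A (Python) =====
-- move = [[1, 0], [0, 1], [-1, -1]]
--
-- def solution(n):
--     board = [[0] * n for _ in range(n)]
--
--     status = 0  # 0: 아래로, 1: 오른쪽, 2: 위쪽
--     x, y = 0, 0
--     for i in range(n * (n + 1) // 2):
--         board[x][y] = i + 1
--         dx, dy = move[status]
--         nx, ny = x + dx, y + dy
--         if nx < 0 or nx >= n or ny < 0 or ny >= n or (board[nx][ny] != 0):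
--             status = (status + 1) % 3
--             dx, dy = move[status]
--             nx, ny = x + dx, y + dy
--
--         x, y = nx, ny
--
--     answer = []
--     for i in range(n):
--         for j in range(i + 1):
--             answer.append(board[i][j])
--
--     return answer
-- ===== SOURCE B (Python) =====
-- def solution(n):
--     # Closed form per cell, no board and no cell-by-cell walk with collision
--     # tests: cell (i, j) of the triangle lies on shell d = min(j, n-1-i, i-j)
--     # of the spiral; shell d starts with value s = 1 + 3*d*(n-1) - 9*d*(d-1)//2
--     # and the cell sits on its first column, bottom row or anti-diagonal.
--     out = []
--     for i in range(n):
--         c = n - 1 - i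
--         for j in range(i + 1):
--             d = j
--             if c < d:
--                 d = c
--             if i - j < d:
--                 d = i - j
--             s = 1 + 3 * d * (n - 1) - 9 * (d * (d - 1) // 2)
--             m = n - 3 * d          # size of shell d's sub-triangle
--             i2 = i - 2 * d
--             j2 = j - d
--             if j2 == 0:
--                 out.append(s + i2)
--             elif i2 == m - 1:
--                 out.append(s + m - 1 + j2)
--             else:
--                 out.append(s + 3 * m - 3 - i2)
--     return out
-- ===== Notes on version B (the rewrite author's own statement) =====
-- stated objective: alternative
-- what changed: B replaces A's cell-by-cell spiral walk over a mutable n-by-n board with out-of-bounds/already-filled collision checks by a closed-form expression: each triangle cell (i,j) lies on shell d = min(j, n-1-i, i-j), whose start value and arm values are computed arithmetically, so no board and no walk exist at all.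
-- outside the precondition, e.g. on solution(-2): A raises IndexError, B returns []
import Mathlib
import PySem

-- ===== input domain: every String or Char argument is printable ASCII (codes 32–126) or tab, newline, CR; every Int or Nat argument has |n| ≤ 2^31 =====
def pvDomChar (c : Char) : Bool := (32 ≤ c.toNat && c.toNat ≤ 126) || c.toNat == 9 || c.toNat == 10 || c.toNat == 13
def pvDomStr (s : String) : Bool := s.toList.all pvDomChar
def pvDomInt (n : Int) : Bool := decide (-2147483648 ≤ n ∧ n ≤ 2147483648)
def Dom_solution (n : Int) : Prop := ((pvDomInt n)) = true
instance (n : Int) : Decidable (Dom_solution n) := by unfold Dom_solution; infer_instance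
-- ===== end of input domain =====

-- B replaces A's cell-by-cell spiral walk with collision tests by a closed form per cell
-- (no board, no walk); equivalence of the return value is proved on Pre_ (n ≥ -1).

-- ===== PORT A =====
-- move[status] as a function; exact because status only ever takes the values 0, 1, 2
def pvMove (st : Int) : Int × Int :=
  if st = 0 then (1, 0) else if st = 1 then (0, 1) else (-1, -1)

-- the Python board (list of lists of ints) is ported as a total function (Int × Int) → Int;
-- exact on Pre_: every read is bounds-checked by the code before access and every write is
-- at an in-range cell (outside Pre_, n ≤ -2, the Python write raises IndexError).
def pvStep (n : Int) (s : ((Int × Int) → Int) × Int × Int × Int) (i : Int) :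
    ((Int × Int) → Int) × Int × Int × Int :=
  let b := s.1; let status := s.2.1; let x := s.2.2.1; let y := s.2.2.2
  let b' : (Int × Int) → Int := fun q => if q = (x, y) then i + 1 else b q
  let d := pvMove status
  let nx := x + d.1
  let ny := y + d.2
  if nx < 0 ∨ n ≤ nx ∨ ny < 0 ∨ n ≤ ny ∨ b' (nx, ny) ≠ 0 then
    let status' := PySem.Int.mod (status + 1) 3
    let d' := pvMove status'
    (b', status', x + d'.1, y + d'.2)
  else
    (b', status, nx, ny)

def solution (n : Int) : List Int :=
  let fin := (PySem.List.pyRange 0 (PySem.Int.floordiv (n * (n + 1)) 2) 1).foldl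
      (pvStep n) ((fun _ => 0), 0, 0, 0)
  (PySem.List.pyRange 0 n 1).flatMap (fun i =>
    (PySem.List.pyRange 0 (i + 1) 1).map (fun j => fin.1 (i, j)))

-- ===== PORT B =====
def pvValB (n i j : Int) : Int :=
  let c := n - 1 - i
  let d0 : Int := j
  let d1 := if c < d0 then c else d0
  let d := if i - j < d1 then i - j else d1
  let s := 1 + 3 * d * (n - 1) - 9 * PySem.Int.floordiv (d * (d - 1)) 2
  let m := n - 3 * d
  let i2 := i - 2 * d
  let j2 := j - d
  if j2 = 0 then s + i2
  else if i2 = m - 1 then s + m - 1 + j2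
  else s + 3 * m - 3 - i2

def solution_alt (n : Int) : List Int :=
  (PySem.List.pyRange 0 n 1).foldl (fun out i =>
    (PySem.List.pyRange 0 (i + 1) 1).foldl (fun out2 j => out2 ++ [pvValB n i j]) out) []

-- ===== PRECONDITION & SPEC =====
-- Pre_ excludes exactly n ≤ -2, where A raises IndexError (empty board, nonempty loop).
def Pre_solution (n : Int) : Prop := -1 ≤ n
instance (n : Int) : Decidable (Pre_solution n) := by unfold Pre_solution; infer_instance
def pvWitness_solution : Int := (4)

def Spec_solution (n : Int) (out : List Int) : Prop := out = solution_alt n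
instance (n : Int) (out : List Int) : Decidable (Spec_solution n out) := by unfold Spec_solution; infer_instance

-- ===== CLAIM (what is proved, stated in full; the proofs are below) =====
def Claim_equal_solution : Prop := ∀ (n : Int), Dom_solution n → Pre_solution n → Spec_solution n (solution n)
-- ===== LEMMAS AND PROOFS =====
-- proof-side form of B's per-cell value, with d written as a min
def pvVal (n i j : Int) : Int :=
  let d := min (min j (n - 1 - i)) (i - j)
  let s := 1 + 3 * d * (n - 1) - 9 * PySem.Int.floordiv (d * (d - 1)) 2
  let m := n - 3 * d
  let i' := i - 2 * d
  let j' := j - d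
  if j' = 0 then s + i'
  else if i' = m - 1 then s + m - 1 + j'
  else s + 3 * m - 3 - i'

lemma pvValB_eq (n i j : Int) : pvValB n i j = pvVal n i j := by
  simp only [pvValB, pvVal]
  rw [show (if i - j < (if n - 1 - i < j then n - 1 - i else j) then i - j
        else (if n - 1 - i < j then n - 1 - i else j)) = min (min j (n - 1 - i)) (i - j) from by
      split_ifs <;> omega]

lemma pvAlt_flat (n : Int) : solution_alt n
    = (PySem.List.pyRange 0 n 1).flatMap (fun i =>
        (PySem.List.pyRange 0 (i + 1) 1).map (fun j => pvVal n i j)) := by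
  unfold solution_alt
  rw [show (fun (out : List Int) (i : Int) =>
        (PySem.List.pyRange 0 (i + 1) 1).foldl (fun out2 j => out2 ++ [pvValB n i j]) out)
      = (fun (out : List Int) (i : Int) =>
        out ++ (PySem.List.pyRange 0 (i + 1) 1).map (fun j => pvVal n i j)) from
    funext fun out => funext fun i => by
      rw [PySem.List.foldl_append_singleton_eq_map]
      exact congrArg (out ++ ·) (List.map_congr_left fun j _ => pvValB_eq n i j)]
  rw [PySem.List.foldl_append_eq_flatMap]
  exact List.nil_append _

lemma pvStep_blocked (n : Int) (b : (Int × Int) → Int) (st x y i dx dy : Int)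
    (Hm : pvMove st = (dx, dy))
    (h : x + dx < 0 ∨ n ≤ x + dx ∨ y + dy < 0 ∨ n ≤ y + dy ∨
      (if (x + dx, y + dy) = (x, y) then i + 1 else b (x + dx, y + dy)) ≠ 0) :
    pvStep n (b, st, x, y) i =
      ((fun q => if q = (x, y) then i + 1 else b q), PySem.Int.mod (st + 1) 3,
       x + (pvMove (PySem.Int.mod (st + 1) 3)).1, y + (pvMove (PySem.Int.mod (st + 1) 3)).2) := by
  simp only [pvStep, Hm]
  rw [if_pos h]

lemma pvStep_free (n : Int) (b : (Int × Int) → Int) (st x y i dx dy : Int)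
    (Hm : pvMove st = (dx, dy))
    (h : ¬ (x + dx < 0 ∨ n ≤ x + dx ∨ y + dy < 0 ∨ n ≤ y + dy ∨
      (if (x + dx, y + dy) = (x, y) then i + 1 else b (x + dx, y + dy)) ≠ 0)) :
    pvStep n (b, st, x, y) i =
      ((fun q => if q = (x, y) then i + 1 else b q), st, x + dx, y + dy) := by
  simp only [pvStep, Hm]
  rw [if_neg h]

lemma pvNeA (dx dy : Int)
    (Hd : (dx = 1 ∧ dy = 0) ∨ (dx = 0 ∧ dy = 1) ∨ (dx = -1 ∧ dy = -1))
    (x y : Int) : (x + dx, y + dy) ≠ (x, y) := by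
  rcases Hd with ⟨e1, e2⟩ | ⟨e1, e2⟩ | ⟨e1, e2⟩ <;> subst e1 <;> subst e2 <;>
    simp only [ne_eq, Prod.mk.injEq, not_and] <;> intro h1 h2 <;> omega

lemma pvNeB (dx dy : Int)
    (Hd : (dx = 1 ∧ dy = 0) ∨ (dx = 0 ∧ dy = 1) ∨ (dx = -1 ∧ dy = -1))
    (x y a : Int) (ha : a ≠ 0) : (x + a * dx, y + a * dy) ≠ (x, y) := by
  rcases Hd with ⟨e1, e2⟩ | ⟨e1, e2⟩ | ⟨e1, e2⟩ <;> subst e1 <;> subst e2 <;>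
    simp only [ne_eq, Prod.mk.injEq, not_and] <;> intro h1 h2 <;> omega

lemma pvSeg (n dx dy st : Int)
    (Hd : (dx = 1 ∧ dy = 0) ∨ (dx = 0 ∧ dy = 1) ∨ (dx = -1 ∧ dy = -1))
    (Hm : pvMove st = (dx, dy)) :
    ∀ (L : Nat) (t x y : Int) (b : (Int × Int) → Int),
    0 < L →
    (∀ k : Nat, k < L →
      (0 ≤ x + k * dx ∧ x + k * dx < n ∧ 0 ≤ y + k * dy ∧ y + k * dy < n) ∧
      b (x + k * dx, y + k * dy) = 0) →
    (x + L * dx < 0 ∨ n ≤ x + L * dx ∨ y + L * dy < 0 ∨ n ≤ y + L * dy ∨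
      b (x + L * dx, y + L * dy) ≠ 0) →
    ∃ b' : (Int × Int) → Int,
      (PySem.List.pyRange t (t + L) 1).foldl (pvStep n) (b, st, x, y)
        = (b', PySem.Int.mod (st + 1) 3,
           x + ((L : Int) - 1) * dx + (pvMove (PySem.Int.mod (st + 1) 3)).1,
           y + ((L : Int) - 1) * dy + (pvMove (PySem.Int.mod (st + 1) 3)).2) ∧
      (∀ k : Nat, k < L → b' (x + k * dx, y + k * dy) = t + 1 + k) ∧
      (∀ q, (∀ k : Nat, k < L → q ≠ (x + k * dx, y + k * dy)) → b' q = b q) := by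
  intro L
  induction L with
  | zero => intro t x y b h; exact absurd h (lt_irrefl 0)
  | succ L ih =>
    intro t x y b _ Hc Hb
    have hrange : PySem.List.pyRange t (t + ((L + 1 : Nat) : Int)) 1
        = t :: PySem.List.pyRange (t + 1) (t + ((L + 1 : Nat) : Int)) 1 :=
      PySem.List.pyRange_one_cons (by push_cast; omega)
    rw [hrange, List.foldl_cons]
    have hneA := pvNeA dx dy Hd x y
    rcases Nat.eq_zero_or_pos L with h0 | hLpos
    · -- last cell of the segment: the step turns
      subst h0
      have hb' : (x + ((1:Nat) : Int) * dx < 0 ∨ n ≤ x + ((1:Nat) : Int) * dx ∨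
          y + ((1:Nat) : Int) * dy < 0 ∨ n ≤ y + ((1:Nat) : Int) * dy ∨
          b (x + ((1:Nat) : Int) * dx, y + ((1:Nat) : Int) * dy) ≠ 0) := Hb
      have e1 : x + ((1:Nat) : Int) * dx = x + dx := by push_cast; ring
      have e2 : y + ((1:Nat) : Int) * dy = y + dy := by push_cast; ring
      rw [e1, e2] at hb'
      have hstep := pvStep_blocked n b st x y t dx dy Hm (by
        rw [if_neg hneA]; exact hb')
      rw [hstep]
      rw [show PySem.List.pyRange (t + 1) (t + (((0:Nat) + 1 : Nat) : Int)) 1 = [] from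
        PySem.List.pyRange_one_eq_nil (by push_cast; omega)]
      refine ⟨fun q => if q = (x, y) then t + 1 else b q, ?_, ?_, ?_⟩
      · simp only [List.foldl_nil]
        have p1 : x + ((((0:Nat) + 1 : Nat) : Int) - 1) * dx + (pvMove (PySem.Int.mod (st + 1) 3)).1
            = x + (pvMove (PySem.Int.mod (st + 1) 3)).1 := by push_cast; ring
        have p2 : y + ((((0:Nat) + 1 : Nat) : Int) - 1) * dy + (pvMove (PySem.Int.mod (st + 1) 3)).2
            = y + (pvMove (PySem.Int.mod (st + 1) 3)).2 := by push_cast; ring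
        rw [p1, p2]
      · intro k hk
        have hk0 : k = 0 := by omega
        subst hk0
        simp only [Nat.cast_zero, zero_mul, add_zero]
        simp
      · intro q hq
        have := hq 0 (by omega)
        simp only [Nat.cast_zero, zero_mul, add_zero] at this
        simp [this]
    · -- interior cell: the step goes straight on
      obtain ⟨⟨ha1, ha2, ha3, ha4⟩, hz1⟩ := Hc 1 (by omega)
      have e1 : x + ((1:Nat) : Int) * dx = x + dx := by push_cast; ring
      have e2 : y + ((1:Nat) : Int) * dy = y + dy := by push_cast; ring
      rw [e1] at ha1 ha2
      rw [e2] at ha3 ha4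
      rw [e1, e2] at hz1
      have hstep := pvStep_free n b st x y t dx dy Hm (by
        rw [if_neg hneA]
        push Not
        exact ⟨by omega, by omega, by omega, by omega, hz1⟩)
      rw [hstep]
      have hre : t + ((L + 1 : Nat) : Int) = (t + 1) + (L : Int) := by push_cast; ring
      rw [hre]
      obtain ⟨b', hfold, hcells, hout⟩ := ih (t + 1) (x + dx) (y + dy)
        (fun q => if q = (x, y) then t + 1 else b q) hLpos
        (by
          intro k hk
          obtain ⟨⟨g1, g2, g3, g4⟩, gz⟩ := Hc (k + 1) (by omega)
          have f1 : x + ((k + 1 : Nat) : Int) * dx = x + dx + (k : Int) * dx := by push_cast; ring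
          have f2 : y + ((k + 1 : Nat) : Int) * dy = y + dy + (k : Int) * dy := by push_cast; ring
          rw [f1] at g1 g2
          rw [f2] at g3 g4
          rw [f1, f2] at gz
          refine ⟨⟨g1, g2, g3, g4⟩, ?_⟩
          beta_reduce
          have f3 : x + dx + (k : Int) * dx = x + ((k : Int) + 1) * dx := by ring
          have f4 : y + dy + (k : Int) * dy = y + ((k : Int) + 1) * dy := by ring
          rw [f3, f4, if_neg (pvNeB dx dy Hd x y ((k : Int) + 1) (by omega))]
          rw [f3, f4] at gz
          exact gz)
        (by
          have f1 : x + ((L + 1 : Nat) : Int) * dx = x + dx + (L : Int) * dx := by push_cast; ring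
          have f2 : y + ((L + 1 : Nat) : Int) * dy = y + dy + (L : Int) * dy := by push_cast; ring
          rw [f1, f2] at Hb
          rcases Hb with h | h | h | h | h
          · exact Or.inl h
          · exact Or.inr (Or.inl h)
          · exact Or.inr (Or.inr (Or.inl h))
          · exact Or.inr (Or.inr (Or.inr (Or.inl h)))
          · refine Or.inr (Or.inr (Or.inr (Or.inr ?_)))
            beta_reduce
            have f3 : x + dx + (L : Int) * dx = x + ((L : Int) + 1) * dx := by ring
            have f4 : y + dy + (L : Int) * dy = y + ((L : Int) + 1) * dy := by ring
            rw [f3, f4, if_neg (pvNeB dx dy Hd x y ((L : Int) + 1) (by omega))]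
            rw [f3, f4] at h
            exact h)
      refine ⟨b', ?_, ?_, ?_⟩
      · rw [hfold]
        have p1 : x + dx + ((L : Int) - 1) * dx = x + (((L + 1 : Nat) : Int) - 1) * dx := by
          push_cast; ring
        have p2 : y + dy + ((L : Int) - 1) * dy = y + (((L + 1 : Nat) : Int) - 1) * dy := by
          push_cast; ring
        rw [p1, p2]
      · intro k hk
        match k with
        | 0 =>
          simp only [Nat.cast_zero, zero_mul, add_zero]
          rw [hout (x, y) (by
            intro k' hk'
            have f3 : x + dx + (k' : Int) * dx = x + ((k' : Int) + 1) * dx := by ring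
            have f4 : y + dy + (k' : Int) * dy = y + ((k' : Int) + 1) * dy := by ring
            rw [f3, f4]
            exact (pvNeB dx dy Hd x y ((k' : Int) + 1) (by omega)).symm)]
          simp
        | (k' + 1) =>
          have := hcells k' (by omega)
          have f1 : x + dx + (k' : Int) * dx = x + ((k' + 1 : Nat) : Int) * dx := by push_cast; ring
          have f2 : y + dy + (k' : Int) * dy = y + ((k' + 1 : Nat) : Int) * dy := by push_cast; ring
          rw [f1, f2] at this
          rw [this]
          push_cast
          ring
      · intro q hq
        rw [hout q (by
          intro k' hk'
          have f1 : x + dx + (k' : Int) * dx = x + ((k' + 1 : Nat) : Int) * dx := by push_cast; ring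
          have f2 : y + dy + (k' : Int) * dy = y + ((k' + 1 : Nat) : Int) * dy := by push_cast; ring
          rw [f1, f2]
          exact hq (k' + 1) (by omega))]
        have hq0 : q ≠ (x, y) := by simpa using hq 0 (by omega)
        simp [hq0]

lemma pvSegDown (n : Int) (L : Nat) (t x y : Int) (b : (Int × Int) → Int) (hL : 0 < L)
    (Hc : ∀ k : Nat, k < L → (0 ≤ x + k ∧ x + k < n ∧ 0 ≤ y ∧ y < n) ∧ b (x + k, y) = 0)
    (Hb : x + L < 0 ∨ n ≤ x + L ∨ y < 0 ∨ n ≤ y ∨ b (x + L, y) ≠ 0) :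
    ∃ b' : (Int × Int) → Int,
      (PySem.List.pyRange t (t + L) 1).foldl (pvStep n) (b, 0, x, y)
        = (b', 1, x + L - 1, y + 1) ∧
      (∀ k : Nat, k < L → b' (x + k, y) = t + 1 + k) ∧
      (∀ q, (∀ k : Nat, k < L → q ≠ (x + k, y)) → b' q = b q) := by
  have m1 : PySem.Int.mod ((0 : Int) + 1) 3 = 1 := by decide
  have hv : pvMove 1 = ((0 : Int), (1 : Int)) := by decide
  obtain ⟨b', h1, h2, h3⟩ := pvSeg n 1 0 0 (Or.inl ⟨rfl, rfl⟩) (by decide) L t x y b hL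
    (by intro k hk; simpa using Hc k hk)
    (by simpa using Hb)
  rw [m1, hv] at h1
  refine ⟨b', ?_, by intro k hk; simpa using h2 k hk, ?_⟩
  · rw [h1]
    have p1 : x + ((L : Int) - 1) * 1 + ((0 : Int), (1 : Int)).1 = x + L - 1 := by norm_num; ring
    have p2 : y + ((L : Int) - 1) * 0 + ((0 : Int), (1 : Int)).2 = y + 1 := by norm_num
    rw [p1, p2]
  · intro q hq
    exact h3 q (by intro k hk; simpa using hq k hk)

lemma pvSegRight (n : Int) (L : Nat) (t x y : Int) (b : (Int × Int) → Int) (hL : 0 < L)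
    (Hc : ∀ k : Nat, k < L → (0 ≤ x ∧ x < n ∧ 0 ≤ y + k ∧ y + k < n) ∧ b (x, y + k) = 0)
    (Hb : x < 0 ∨ n ≤ x ∨ y + L < 0 ∨ n ≤ y + L ∨ b (x, y + L) ≠ 0) :
    ∃ b' : (Int × Int) → Int,
      (PySem.List.pyRange t (t + L) 1).foldl (pvStep n) (b, 1, x, y)
        = (b', 2, x - 1, y + L - 2) ∧
      (∀ k : Nat, k < L → b' (x, y + k) = t + 1 + k) ∧
      (∀ q, (∀ k : Nat, k < L → q ≠ (x, y + k)) → b' q = b q) := by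
  have m1 : PySem.Int.mod ((1 : Int) + 1) 3 = 2 := by decide
  have hv : pvMove 2 = ((-1 : Int), (-1 : Int)) := by decide
  obtain ⟨b', h1, h2, h3⟩ := pvSeg n 0 1 1 (Or.inr (Or.inl ⟨rfl, rfl⟩)) (by decide) L t x y b hL
    (by intro k hk; simpa using Hc k hk)
    (by simpa using Hb)
  rw [m1, hv] at h1
  refine ⟨b', ?_, by intro k hk; simpa using h2 k hk, ?_⟩
  · rw [h1]
    have p1 : x + ((L : Int) - 1) * 0 + ((-1 : Int), (-1 : Int)).1 = x - 1 := by norm_num; ring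
    have p2 : y + ((L : Int) - 1) * 1 + ((-1 : Int), (-1 : Int)).2 = y + L - 2 := by
      norm_num; ring
    rw [p1, p2]
  · intro q hq
    exact h3 q (by intro k hk; simpa using hq k hk)

lemma pvSegUp (n : Int) (L : Nat) (t x y : Int) (b : (Int × Int) → Int) (hL : 0 < L)
    (Hc : ∀ k : Nat, k < L → (0 ≤ x - k ∧ x - k < n ∧ 0 ≤ y - k ∧ y - k < n) ∧ b (x - k, y - k) = 0)
    (Hb : x - L < 0 ∨ n ≤ x - L ∨ y - L < 0 ∨ n ≤ y - L ∨ b (x - L, y - L) ≠ 0) :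
    ∃ b' : (Int × Int) → Int,
      (PySem.List.pyRange t (t + L) 1).foldl (pvStep n) (b, 2, x, y)
        = (b', 0, x - L + 2, y - L + 1) ∧
      (∀ k : Nat, k < L → b' (x - k, y - k) = t + 1 + k) ∧
      (∀ q, (∀ k : Nat, k < L → q ≠ (x - k, y - k)) → b' q = b q) := by
  have m1 : PySem.Int.mod ((2 : Int) + 1) 3 = 0 := by decide
  have hv : pvMove 0 = ((1 : Int), (0 : Int)) := by decide
  have ecell : ∀ k : Nat, (x + (k : Int) * (-1), y + (k : Int) * (-1)) = (x - k, y - k) := by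
    intro k; norm_num; constructor <;> ring
  obtain ⟨b', h1, h2, h3⟩ := pvSeg n (-1) (-1) 2 (Or.inr (Or.inr ⟨rfl, rfl⟩)) (by decide) L t x y b hL
    (by intro k hk
        obtain ⟨⟨g1, g2, g3, g4⟩, gz⟩ := Hc k hk
        refine ⟨⟨by omega, by omega, by omega, by omega⟩, ?_⟩
        rw [ecell k]; exact gz)
    (by rw [show x + (L : Int) * (-1) = x - L from by ring, show y + (L : Int) * (-1) = y - L from by ring]
        exact Hb)
  rw [m1, hv] at h1
  refine ⟨b', ?_, ?_, ?_⟩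
  · rw [h1]
    have p1 : x + ((L : Int) - 1) * (-1) + ((1 : Int), (0 : Int)).1 = x - L + 2 := by
      norm_num; ring
    have p2 : y + ((L : Int) - 1) * (-1) + ((1 : Int), (0 : Int)).2 = y - L + 1 := by
      norm_num; ring
    rw [p1, p2]
  · intro k hk
    have := h2 k hk
    rw [ecell k] at this
    exact this
  · intro q hq
    refine h3 q ?_
    intro k hk
    rw [ecell k]
    exact hq k hk

def pvTv : Nat → Int → Int → Int
  | 0, _, _ => 0
  | (m + 1), i, j =>
    if j = 0 then i + 1
    else if i = ((m + 1 : Nat) : Int) - 1 then ((m + 1 : Nat) : Int) + j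
    else if i = j then 3 * ((m + 1 : Nat) : Int) - 2 - i
    else 3 * ((m + 1 : Nat) : Int) - 3 + pvTv (m - 2) (i - 2) (j - 1)

lemma pvTv_pos (m : Nat) (hm : 0 < m) (i j : Int) :
    pvTv m i j =
      if j = 0 then i + 1
      else if i = (m : Int) - 1 then (m : Int) + j
      else if i = j then 3 * (m : Int) - 2 - i
      else 3 * (m : Int) - 3 + pvTv (m - 3) (i - 2) (j - 1) := by
  rcases m with _ | m0
  · omega
  · show pvTv (m0 + 1) i j = _
    rw [show ((m0 + 1) - 3 : Nat) = m0 - 2 from rfl]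
    simp only [pvTv]

lemma pvSpiral (n : Int) :
    ∀ (m : Nat) (ox oy t : Int) (b : (Int × Int) → Int),
    0 < m →
    0 ≤ t → 0 ≤ ox → 0 ≤ oy → ox + m ≤ n → oy + m ≤ n →
    (∀ i j : Nat, j ≤ i → i < m → b (ox + i, oy + j) = 0) →
    (ox + m < 0 ∨ n ≤ ox + m ∨ oy < 0 ∨ n ≤ oy ∨ b (ox + m, oy) ≠ 0) →
    (ox + m - 1 < 0 ∨ n ≤ ox + m - 1 ∨ oy + m < 0 ∨ n ≤ oy + m ∨ b (ox + m - 1, oy + m) ≠ 0) →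
    ∃ (b' : (Int × Int) → Int) (st' x' y' : Int),
      (PySem.List.pyRange t (t + (m * (m + 1) / 2 : Nat)) 1).foldl (pvStep n) (b, 0, ox, oy)
        = (b', st', x', y') ∧
      (∀ i j : Nat, j ≤ i → i < m → b' (ox + i, oy + j) = t + pvTv m i j) ∧
      (∀ q, (∀ i j : Nat, j ≤ i → i < m → q ≠ (ox + i, oy + j)) → b' q = b q) := by
  intro m
  induction m using Nat.strong_induction_on with
  | _ m IH =>
  intro ox oy t b hm ht hox hoy hoxn hoyn Hz HbD HbR
  rcases Nat.lt_or_ge m 3 with hm3 | hm3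
  · -- m = 1 or m = 2
    have : m = 1 ∨ m = 2 := by omega
    rcases this with rfl | rfl
    · -- m = 1 : a single down step that writes the only cell and turns
      rw [show (1 * (1 + 1) / 2 : Nat) = 1 from rfl]
      obtain ⟨b1, hf1, hc1, ho1⟩ := pvSegDown n 1 t ox oy b (by omega)
        (by
          intro k hk
          have hk0 : k = 0 := by omega
          subst hk0
          exact ⟨⟨by omega, by omega, by omega, by omega⟩,
            by simpa using Hz 0 0 le_rfl (by omega)⟩)
        HbD
      rw [hf1]
      refine ⟨b1, 1, ox + ((1 : Nat) : Int) - 1, oy + 1, rfl, ?_, ?_⟩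
      · intro i j hji him
        have hi0 : i = 0 := by omega
        have hj0 : j = 0 := by omega
        subst hi0; subst hj0
        have h := hc1 0 (by omega)
        simp only [Nat.cast_zero, add_zero] at h ⊢
        rw [h]
        simp [pvTv]
      · intro q hq
        refine ho1 q ?_
        intro k hk
        have hk0 : k = 0 := by omega
        subst hk0
        simpa using hq 0 0 le_rfl (by omega)
    · -- m = 2 : down segment of length 2, then right segment of length 1
      rw [show (2 * (2 + 1) / 2 : Nat) = 3 from rfl]
      rw [show (t + ((3 : Nat) : Int)) = t + ((2 : Nat) : Int) + ((1 : Nat) : Int) from by push_cast; ring]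
      rw [PySem.List.pyRange_one_append t (t + ((2 : Nat) : Int))
        (t + ((2 : Nat) : Int) + ((1 : Nat) : Int)) (by push_cast; omega) (by push_cast; omega)]
      rw [List.foldl_append]
      obtain ⟨b1, hf1, hc1, ho1⟩ := pvSegDown n 2 t ox oy b (by omega)
        (by
          intro k hk
          refine ⟨⟨by omega, by omega, by omega, by omega⟩, ?_⟩
          simpa using Hz k 0 (Nat.zero_le k) (by omega))
        HbD
      rw [hf1]
      obtain ⟨b2, hf2, hc2, ho2⟩ := pvSegRight n 1 (t + ((2 : Nat) : Int))
        (ox + ((2 : Nat) : Int) - 1) (oy + 1) b1 (by omega)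
        (by
          intro k hk
          have hk0 : k = 0 := by omega
          subst hk0
          refine ⟨⟨by omega, by omega, by omega, by omega⟩, ?_⟩
          rw [ho1 _ (by
            intro k' hk'
            simp only [ne_eq, Prod.mk.injEq, not_and]
            intro _ h2
            omega)]
          rw [show (ox + ((2 : Nat) : Int) - 1 : Int) = ox + ((1 : Nat) : Int) from by push_cast; ring,
              show (oy + 1 + ((0 : Nat) : Int) : Int) = oy + ((1 : Nat) : Int) from by push_cast; ring]
          exact Hz 1 1 le_rfl (by omega))
        (by
          rcases HbR with h | h | h | h | h
          · exact Or.inl (by omega)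
          · exact Or.inr (Or.inl (by omega))
          · exact Or.inr (Or.inr (Or.inl (by omega)))
          · exact Or.inr (Or.inr (Or.inr (Or.inl (by omega))))
          · refine Or.inr (Or.inr (Or.inr (Or.inr ?_)))
            rw [ho1 _ (by
              intro k' hk'
              simp only [ne_eq, Prod.mk.injEq, not_and]
              intro _ h2
              omega)]
            rw [show (oy + 1 + ((1 : Nat) : Int) : Int) = oy + ((2 : Nat) : Int) from by push_cast; ring]
            exact h)
      rw [hf2]
      refine ⟨b2, 2, _, _, rfl, ?_, ?_⟩
      · intro i j hji him
        have : (i = 0 ∧ j = 0) ∨ (i = 1 ∧ j = 0) ∨ (i = 1 ∧ j = 1) := by omega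
        rcases this with ⟨rfl, rfl⟩ | ⟨rfl, rfl⟩ | ⟨rfl, rfl⟩
        · rw [ho2 _ (by
            intro k hk
            simp only [ne_eq, Prod.mk.injEq, not_and]
            intro _ h2
            omega)]
          have h := hc1 0 (by omega)
          simp only [Nat.cast_zero, add_zero] at h ⊢
          rw [h]
          simp [pvTv]
        · rw [ho2 _ (by
            intro k hk
            simp only [ne_eq, Prod.mk.injEq, not_and]
            intro _ h2
            omega)]
          have h := hc1 1 (by omega)
          simp only [Nat.cast_zero, Nat.cast_one, add_zero] at h ⊢
          rw [h]
          simp [pvTv]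
          omega
        · have h := hc2 0 (by omega)
          rw [show (ox + ((2 : Nat) : Int) - 1 : Int) = ox + ((1 : Nat) : Int) from by push_cast; ring,
              show (oy + 1 + ((0 : Nat) : Int) : Int) = oy + ((1 : Nat) : Int) from by push_cast; ring] at h
          rw [h]
          simp [pvTv]
          ring
      · intro q hq
        rw [ho2 q (by
          intro k hk
          have hk0 : k = 0 := by omega
          subst hk0
          rw [show (ox + ((2 : Nat) : Int) - 1 : Int) = ox + ((1 : Nat) : Int) from by push_cast; ring,
              show (oy + 1 + ((0 : Nat) : Int) : Int) = oy + ((1 : Nat) : Int) from by push_cast; ring]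
          exact hq 1 1 le_rfl (by omega))]
        refine ho1 q ?_
        intro k hk
        simpa using hq k 0 (Nat.zero_le k) (by omega)
  · -- m ≥ 3 : down m, right m-1, up-left m-2, then the inner spiral of size m-3
    obtain ⟨mm, rfl⟩ : ∃ mm, m = mm + 3 := ⟨m - 3, by omega⟩
    obtain ⟨a, ha⟩ : ∃ a, mm * (mm + 1) = a + a := (Nat.even_mul_succ_self mm)
    have hTa : (mm * (mm + 1) / 2 : Nat) = a := by omega
    have hT : ((mm + 3) * ((mm + 3) + 1) / 2 : Nat) = (mm + 3) + (mm + 2) + (mm + 1) + a := by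
      have hx : (mm + 3) * ((mm + 3) + 1) = mm * (mm + 1) + 6 * mm + 12 := by ring
      omega
    have hTi : (((mm + 3) * ((mm + 3) + 1) / 2 : Nat) : Int)
        = ((mm + 3 : Nat) : Int) + ((mm + 2 : Nat) : Int) + ((mm + 1 : Nat) : Int) + (a : Int) := by
      rw [hT]; push_cast; ring
    rw [hTi,
        show t + (((mm + 3 : Nat) : Int) + ((mm + 2 : Nat) : Int) + ((mm + 1 : Nat) : Int) + (a : Int))
          = t + ((mm + 3 : Nat) : Int) + ((mm + 2 : Nat) : Int) + ((mm + 1 : Nat) : Int) + (a : Int) from by ring]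
    rw [PySem.List.pyRange_one_append t (t + ((mm + 3 : Nat) : Int)) _ (by push_cast; omega) (by push_cast; omega)]
    rw [PySem.List.pyRange_one_append (t + ((mm + 3 : Nat) : Int))
      (t + ((mm + 3 : Nat) : Int) + ((mm + 2 : Nat) : Int)) _ (by push_cast; omega) (by push_cast; omega)]
    rw [PySem.List.pyRange_one_append (t + ((mm + 3 : Nat) : Int) + ((mm + 2 : Nat) : Int))
      (t + ((mm + 3 : Nat) : Int) + ((mm + 2 : Nat) : Int) + ((mm + 1 : Nat) : Int)) _
      (by push_cast; omega) (by push_cast; omega)]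
    rw [List.foldl_append, List.foldl_append, List.foldl_append]
    -- segment 1 : down, length mm+3
    obtain ⟨b1, hf1, hc1, ho1⟩ := pvSegDown n (mm + 3) t ox oy b (by omega)
      (by
        intro k hk
        refine ⟨⟨by omega, by omega, by omega, by omega⟩, ?_⟩
        simpa using Hz k 0 (Nat.zero_le k) (by omega))
      HbD
    rw [hf1]
    -- segment 2 : right, length mm+2
    obtain ⟨b2, hf2, hc2, ho2⟩ := pvSegRight n (mm + 2) (t + ((mm + 3 : Nat) : Int))
      (ox + ((mm + 3 : Nat) : Int) - 1) (oy + 1) b1 (by omega)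
      (by
        intro k hk
        refine ⟨⟨by omega, by omega, by omega, by omega⟩, ?_⟩
        rw [ho1 _ (by
          intro k' hk'
          simp only [ne_eq, Prod.mk.injEq, not_and]
          intro _ h2
          omega)]
        rw [show (ox + ((mm + 3 : Nat) : Int) - 1 : Int) = ox + ((mm + 2 : Nat) : Int) from by push_cast; ring,
            show (oy + 1 + (k : Int) : Int) = oy + ((k + 1 : Nat) : Int) from by push_cast; ring]
        exact Hz (mm + 2) (k + 1) (by omega) (by omega))
      (by
        rcases HbR with h | h | h | h | h
        · exact Or.inl (by omega)
        · exact Or.inr (Or.inl (by omega))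
        · exact Or.inr (Or.inr (Or.inl (by omega)))
        · exact Or.inr (Or.inr (Or.inr (Or.inl (by omega))))
        · refine Or.inr (Or.inr (Or.inr (Or.inr ?_)))
          rw [ho1 _ (by
            intro k' hk'
            simp only [ne_eq, Prod.mk.injEq, not_and]
            intro _ h2
            omega)]
          rw [show (oy + 1 + ((mm + 2 : Nat) : Int) : Int) = oy + ((mm + 3 : Nat) : Int) from by push_cast; ring]
          exact h)
    rw [hf2]
    rw [show (ox + ((mm + 3 : Nat) : Int) - 1 - 1 : Int) = ox + (mm : Int) + 1 from by push_cast; ring,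
        show (oy + 1 + ((mm + 2 : Nat) : Int) - 2 : Int) = oy + (mm : Int) + 1 from by push_cast; ring]
    -- segment 3 : up-left, length mm+1
    obtain ⟨b3, hf3, hc3, ho3⟩ := pvSegUp n (mm + 1)
      (t + ((mm + 3 : Nat) : Int) + ((mm + 2 : Nat) : Int))
      (ox + (mm : Int) + 1) (oy + (mm : Int) + 1) b2 (by omega)
      (by
        intro k hk
        refine ⟨⟨by omega, by omega, by omega, by omega⟩, ?_⟩
        rw [ho2 _ (by
          intro k' hk'
          simp only [ne_eq, Prod.mk.injEq, not_and]
          intro h1 _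
          omega)]
        rw [ho1 _ (by
          intro k' hk'
          simp only [ne_eq, Prod.mk.injEq, not_and]
          intro _ h2
          omega)]
        rw [show (ox + (mm : Int) + 1 - (k : Int) : Int) = ox + ((mm + 1 - k : Nat) : Int) from by omega,
            show (oy + (mm : Int) + 1 - (k : Int) : Int) = oy + ((mm + 1 - k : Nat) : Int) from by omega]
        exact Hz (mm + 1 - k) (mm + 1 - k) le_rfl (by omega))
      (by
        refine Or.inr (Or.inr (Or.inr (Or.inr ?_)))
        rw [show (ox + (mm : Int) + 1 - ((mm + 1 : Nat) : Int) : Int) = ox from by push_cast; ring,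
            show (oy + (mm : Int) + 1 - ((mm + 1 : Nat) : Int) : Int) = oy from by push_cast; ring]
        rw [ho2 _ (by
          intro k' hk'
          simp only [ne_eq, Prod.mk.injEq, not_and]
          intro _ h2
          omega)]
        have h := hc1 0 (by omega)
        simp only [Nat.cast_zero, add_zero] at h
        rw [h]
        omega)
    rw [hf3]
    rw [show (ox + (mm : Int) + 1 - ((mm + 1 : Nat) : Int) + 2 : Int) = ox + 2 from by push_cast; ring,
        show (oy + (mm : Int) + 1 - ((mm + 1 : Nat) : Int) + 1 : Int) = oy + 1 from by push_cast; ring]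
    -- inner spiral of size mm (possibly empty), then assemble all four regions
    have hinner : ∃ (b4 : (Int × Int) → Int) (st4 x4 y4 : Int),
        (PySem.List.pyRange (t + ((mm + 3 : Nat) : Int) + ((mm + 2 : Nat) : Int) + ((mm + 1 : Nat) : Int))
            (t + ((mm + 3 : Nat) : Int) + ((mm + 2 : Nat) : Int) + ((mm + 1 : Nat) : Int) + (a : Int)) 1).foldl
          (pvStep n) (b3, 0, ox + 2, oy + 1) = (b4, st4, x4, y4) ∧
        (∀ i j : Nat, j ≤ i → i < mm →
          b4 (ox + 2 + (i : Int), oy + 1 + (j : Int))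
            = t + ((mm + 3 : Nat) : Int) + ((mm + 2 : Nat) : Int) + ((mm + 1 : Nat) : Int) + pvTv mm i j) ∧
        (∀ q, (∀ i j : Nat, j ≤ i → i < mm → q ≠ (ox + 2 + (i : Int), oy + 1 + (j : Int))) → b4 q = b3 q) := by
      rcases Nat.eq_zero_or_pos mm with h0 | hpos
      · subst h0
        have ha0 : (a : Int) = 0 := by omega
        rw [ha0, add_zero, PySem.List.pyRange_one_eq_nil le_rfl]
        exact ⟨b3, 0, ox + 2, oy + 1, rfl, by intro i j _ h; omega, fun q _ => rfl⟩
      · have hz' : ∀ i j : Nat, j ≤ i → i < mm → b3 (ox + 2 + (i : Int), oy + 1 + (j : Int)) = 0 := by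
          intro i j hji him
          rw [ho3 _ (by
            intro k hk
            simp only [ne_eq, Prod.mk.injEq, not_and]
            intro h1 h2
            omega)]
          rw [ho2 _ (by
            intro k hk
            simp only [ne_eq, Prod.mk.injEq, not_and]
            intro h1 _
            omega)]
          rw [ho1 _ (by
            intro k hk
            simp only [ne_eq, Prod.mk.injEq, not_and]
            intro _ h2
            omega)]
          rw [show (ox + 2 + (i : Int) : Int) = ox + ((i + 2 : Nat) : Int) from by push_cast; ring,
              show (oy + 1 + (j : Int) : Int) = oy + ((j + 1 : Nat) : Int) from by push_cast; ring]
          exact Hz (i + 2) (j + 1) (by omega) (by omega)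
        obtain ⟨b4, st4, x4, y4, hf4, hc4, ho4⟩ := IH mm (by omega) (ox + 2) (oy + 1)
          (t + ((mm + 3 : Nat) : Int) + ((mm + 2 : Nat) : Int) + ((mm + 1 : Nat) : Int)) b3
          hpos (by omega) (by omega) (by omega) (by push_cast at hoxn ⊢; omega)
          (by push_cast at hoyn ⊢; omega) hz'
          (by
            refine Or.inr (Or.inr (Or.inr (Or.inr ?_)))
            rw [ho3 _ (by
              intro k hk
              simp only [ne_eq, Prod.mk.injEq, not_and]
              intro h1 _
              omega)]
            rw [show (ox + 2 + (mm : Int) : Int) = ox + ((mm + 3 : Nat) : Int) - 1 from by push_cast; ring]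
            have h := hc2 0 (by omega)
            simp only [Nat.cast_zero, add_zero] at h
            rw [h]
            omega)
          (by
            refine Or.inr (Or.inr (Or.inr (Or.inr ?_)))
            rw [show (ox + 2 + (mm : Int) - 1 : Int) = ox + (mm : Int) + 1 from by ring,
                show (oy + 1 + (mm : Int) : Int) = oy + (mm : Int) + 1 from by ring]
            have h := hc3 0 (by omega)
            simp only [Nat.cast_zero, sub_zero] at h
            rw [h]
            omega)
        rw [show ((mm * (mm + 1) / 2 : Nat) : Int) = (a : Int) from Nat.cast_inj.mpr hTa] at hf4
        exact ⟨b4, st4, x4, y4, hf4, hc4, ho4⟩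
    obtain ⟨b4, st4, x4, y4, hf4, hc4, ho4⟩ := hinner
    rw [hf4]
    refine ⟨b4, st4, x4, y4, rfl, ?_, ?_⟩
    · -- the value of every triangle cell
      intro i j hji him
      by_cases hj0 : j = 0
      · subst hj0
        simp only [Nat.cast_zero, add_zero]
        rw [ho4 _ (by
          intro i' j' h1 h2
          simp only [ne_eq, Prod.mk.injEq, not_and]
          intro _ h4
          omega)]
        rw [ho3 _ (by
          intro k hk
          simp only [ne_eq, Prod.mk.injEq, not_and]
          intro _ h4
          omega)]
        rw [ho2 _ (by
          intro k hk
          simp only [ne_eq, Prod.mk.injEq, not_and]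
          intro _ h4
          omega)]
        rw [hc1 i (by omega)]
        rw [pvTv_pos _ (by omega), if_pos rfl]
        omega
      · by_cases hbot : i = mm + 2
        · subst hbot
          rw [ho4 _ (by
            intro i' j' h1 h2
            simp only [ne_eq, Prod.mk.injEq, not_and]
            intro h3 _
            omega)]
          rw [ho3 _ (by
            intro k hk
            simp only [ne_eq, Prod.mk.injEq, not_and]
            intro h3 _
            omega)]
          rw [show (ox + ((mm + 2 : Nat) : Int) : Int) = ox + ((mm + 3 : Nat) : Int) - 1 from by push_cast; ring,
              show (oy + (j : Int) : Int) = oy + 1 + ((j - 1 : Nat) : Int) from by omega]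
          rw [hc2 (j - 1) (by omega)]
          rw [pvTv_pos _ (by omega), if_neg (by omega), if_pos (by push_cast; omega)]
          omega
        · by_cases hdiag : i = j
          · subst hdiag
            rw [ho4 _ (by
              intro i' j' h1 h2
              simp only [ne_eq, Prod.mk.injEq, not_and]
              intro h3 h4
              omega)]
            rw [show (ox + (i : Int) : Int) = ox + (mm : Int) + 1 - ((mm + 1 - i : Nat) : Int) from by omega,
                show (oy + (i : Int) : Int) = oy + (mm : Int) + 1 - ((mm + 1 - i : Nat) : Int) from by omega]
            rw [hc3 (mm + 1 - i) (by omega)]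
            rw [pvTv_pos _ (by omega), if_neg (by omega), if_neg (by omega), if_pos rfl]
            omega
          · -- interior cell: belongs to the inner spiral
            rw [show (ox + (i : Int) : Int) = ox + 2 + ((i - 2 : Nat) : Int) from by omega,
                show (oy + (j : Int) : Int) = oy + 1 + ((j - 1 : Nat) : Int) from by omega]
            rw [hc4 (i - 2) (j - 1) (by omega) (by omega)]
            rw [pvTv_pos (mm + 3) (by omega), if_neg (by omega), if_neg (by omega), if_neg (by omega)]
            rw [show ((mm + 3) - 3 : Nat) = mm from rfl]
            rw [show ((i - 2 : Nat) : Int) = (i : Int) - 2 from by omega,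
                show ((j - 1 : Nat) : Int) = (j : Int) - 1 from by omega]
            push_cast
            ring
    · -- untouched cells
      intro q hq
      rw [ho4 q (by
        intro i' j' h1 h2
        rw [show (ox + 2 + (i' : Int) : Int) = ox + ((i' + 2 : Nat) : Int) from by push_cast; ring,
            show (oy + 1 + (j' : Int) : Int) = oy + ((j' + 1 : Nat) : Int) from by push_cast; ring]
        exact hq (i' + 2) (j' + 1) (by omega) (by omega))]
      rw [ho3 q (by
        intro k hk
        rw [show (ox + (mm : Int) + 1 - (k : Int) : Int) = ox + ((mm + 1 - k : Nat) : Int) from by omega,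
            show (oy + (mm : Int) + 1 - (k : Int) : Int) = oy + ((mm + 1 - k : Nat) : Int) from by omega]
        exact hq (mm + 1 - k) (mm + 1 - k) le_rfl (by omega))]
      rw [ho2 q (by
        intro k hk
        rw [show (ox + ((mm + 3 : Nat) : Int) - 1 : Int) = ox + ((mm + 2 : Nat) : Int) from by push_cast; ring,
            show (oy + 1 + (k : Int) : Int) = oy + ((k + 1 : Nat) : Int) from by push_cast; ring]
        exact hq (mm + 2) (k + 1) (by omega) (by omega))]
      exact ho1 q (by
        intro k hk
        simpa using hq k 0 (Nat.zero_le k) (by omega))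

lemma pvTv_eq_pvVal : ∀ (m : Nat) (i j : Int), 0 ≤ j → j ≤ i → i < (m : Int) →
    pvTv m i j = pvVal (m : Int) i j := by
  intro m
  induction m using Nat.strong_induction_on with
  | _ m IH =>
  intro i j h0 hji him
  have hm : 0 < m := by omega
  rw [pvTv_pos m hm]
  by_cases hj0 : j = 0
  · subst hj0
    rw [if_pos rfl]
    simp only [pvVal]
    rw [show min (min 0 ((m : Int) - 1 - i)) (i - 0) = 0 from by omega]
    norm_num
    ring
  · rw [if_neg hj0]
    by_cases hbot : i = (m : Int) - 1
    · rw [if_pos hbot]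
      simp only [pvVal]
      rw [show min (min j ((m : Int) - 1 - i)) (i - j) = 0 from by omega]
      rw [show (0 : Int) * (0 - 1) = 0 from by ring,
          show PySem.Int.floordiv 0 2 = 0 from by decide]
      rw [if_neg (by omega), if_pos (by omega)]
      omega
    · rw [if_neg hbot]
      by_cases hdiag : i = j
      · rw [if_pos hdiag]
        simp only [pvVal]
        rw [show min (min j ((m : Int) - 1 - i)) (i - j) = 0 from by omega]
        rw [show (0 : Int) * (0 - 1) = 0 from by ring,
            show PySem.Int.floordiv 0 2 = 0 from by decide]
        rw [if_neg (by omega), if_neg (by omega)]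
        omega
      · -- interior: recurse into the inner spiral
        rw [if_neg hdiag]
        have hij : j < i := by omega
        have hm4 : 4 ≤ m := by omega
        have hc3 : ((m - 3 : Nat) : Int) = (m : Int) - 3 := by omega
        rw [IH (m - 3) (by omega) (i - 2) (j - 1) (by omega) (by omega) (by omega)]
        simp only [pvVal]
        rw [hc3]
        set d := min (min j ((m : Int) - 1 - i)) (i - j) with hd_def
        have hd1 : 1 ≤ d := by omega
        have hdin : min (min (j - 1) ((m : Int) - 3 - 1 - (i - 2))) (i - 2 - (j - 1)) = d - 1 := by
          rw [hd_def]; omega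
        rw [hdin]
        have hDq : PySem.Int.floordiv (d * (d - 1)) 2
            = PySem.Int.floordiv ((d - 1) * (d - 1 - 1)) 2 + (d - 1) := by
          rw [show d * (d - 1) = (d - 1) * (d - 1 - 1) + (d - 1) * 2 from by ring]
          rw [PySem.Int.floordiv_eq_ediv_of_pos (by norm_num),
              PySem.Int.floordiv_eq_ediv_of_pos (by norm_num)]
          exact Int.add_mul_ediv_right _ _ (by norm_num)
        rw [hDq]
        by_cases c1 : j - d = 0
        · rw [if_pos c1, if_pos (show j - 1 - (d - 1) = 0 from by omega)]
          ring
        · rw [if_neg c1, if_neg (show ¬ (j - 1 - (d - 1) = 0) from by omega)]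
          by_cases c2 : i - 2 * d = (m : Int) - 3 * d - 1
          · rw [if_pos c2, if_pos (show i - 2 - 2 * (d - 1) = (m : Int) - 3 - 3 * (d - 1) - 1 from by omega)]
            ring
          · rw [if_neg c2, if_neg (show ¬ (i - 2 - 2 * (d - 1) = (m : Int) - 3 - 3 * (d - 1) - 1) from by omega)]
            ring

lemma pvMain : ∀ n : Int, -1 ≤ n → solution n = solution_alt n := by
  intro n hpre
  rcases lt_or_ge n 1 with hn | hn
  · have h2 : n = -1 ∨ n = 0 := by omega
    rcases h2 with rfl | rfl <;> rfl
  · obtain ⟨m, rfl⟩ : ∃ m : Nat, ((m : Int)) = n := ⟨n.toNat, Int.toNat_of_nonneg (by omega)⟩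
    have hm : 0 < m := by omega
    rw [pvAlt_flat]
    unfold solution
    have hT : PySem.Int.floordiv ((m : Int) * ((m : Int) + 1)) 2 = ((m * (m + 1) / 2 : Nat) : Int) := by
      rw [PySem.Int.floordiv_eq_ediv_of_pos (by norm_num)]
      rw [show ((m : Int) * ((m : Int) + 1)) = ((m * (m + 1) : Nat) : Int) from by push_cast; ring]
      rw [show (2 : Int) = ((2 : Nat) : Int) from rfl]
      exact (Int.natCast_div _ _).symm
    rw [hT]
    obtain ⟨bf, st', x', y', hfold, hcells, _⟩ := pvSpiral ((m : Int)) m 0 0 0 (fun _ => 0)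
      hm le_rfl le_rfl le_rfl (by omega) (by omega) (fun _ _ _ _ => rfl)
      (Or.inr (Or.inl (by omega))) (Or.inr (Or.inr (Or.inr (Or.inl (by omega)))))
    rw [show ((0 : Int) + ((m * (m + 1) / 2 : Nat) : Int)) = ((m * (m + 1) / 2 : Nat) : Int) from by ring] at hfold
    simp only [hfold]
    apply List.flatMap_congr
    intro i hi
    obtain ⟨hi0, him⟩ := (PySem.List.mem_pyRange_one).1 hi
    apply List.map_congr_left
    intro j hj
    obtain ⟨hj0, hji'⟩ := (PySem.List.mem_pyRange_one).1 hj
    obtain ⟨iN, rfl⟩ : ∃ iN : Nat, ((iN : Int)) = i := ⟨i.toNat, Int.toNat_of_nonneg hi0⟩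
    obtain ⟨jN, rfl⟩ : ∃ jN : Nat, ((jN : Int)) = j := ⟨j.toNat, Int.toNat_of_nonneg hj0⟩
    have h := hcells iN jN (by omega) (by omega)
    rw [show (((iN : Int)), ((jN : Int))) = ((0 : Int) + iN, (0 : Int) + jN) from by norm_num]
    rw [h]
    rw [show ((0 : Int) + pvTv m iN jN) = pvTv m iN jN from by ring]
    exact pvTv_eq_pvVal m iN jN (by omega) (by omega) (by omega)

-- ===== VERDICT (by name: the statement is the Claim_ definition above) =====
theorem solution_spec : Claim_equal_solution := by
  unfold Claim_equal_solution Spec_solution Pre_solution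
  intro n _ hpre
  exact pvMain n hpre
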